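-- pv_equiv track=rewrite | github.com/YeQ456/Python-Examples | 进阶/例297.不同的路径.py | uniqueWeightPaths
-- ===== SOURCE A (Python) =====
-- def uniqueWeightPaths(grid):
-- 	n = len(grid)
-- 	m = len(grid[0])
-- 	if n == 0 or m == 0:
-- 		return 0
-- 	s = [[set() for _ in range(m)] for __ in range(n)]
-- 	s[0][0].add(grid[0][0])
-- 	for i in range(n):
-- 		for j in range(m):
-- 			if i == 0 and j == 0:
-- 				s[i][j].add(grid[i][j])
-- 			else:
-- 				for val in s[i - 1][j]:
-- 					s[i][j].add(val + grid[i][j])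
-- 				for val in s[i][j - 1]:
-- 					s[i][j].add(val + grid[i][j])
-- 	ans = 0
-- 	for val in s[-1][-1]:
-- 		ans += val
-- 	return ans
-- ===== SOURCE B (Python) =====
-- def uniqueWeightPaths(grid):
--     n = len(grid)
--     m = len(grid[0])
--     if m == 0:
--         return 0
--     memo = {}
--     def reach(i, j):
--         key = (i, j)
--         if key in memo:
--             return memo[key]
--         if i == 0 and j == 0:
--             st = {grid[0][0]}
--         else:
--             g = grid[i][j]
--             st = set()
--             if i > 0:
--                 for v in reach(i - 1, j):
--                     st.add(v + g)
--             if j > 0: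
--                 for v in reach(i, j - 1):
--                     st.add(v + g)
--         memo[key] = st
--         return st
--     return sum(reach(n - 1, m - 1))
-- ===== Notes on version B (the rewrite author's own statement) =====
-- stated objective: alternative
-- what changed: Replaces the bottom-up n*m table of sets (with Python's negative-index reads of not-yet-filled cells) by a recursive, memoized helper reach(i,j) returning the set of path sums to cell (i,j), summed at the target cell.
-- crash fix: On single-column grids with at least two rows whose lower entries are not all zero, A raises RuntimeError ('set changed size during iteration' - the loop over s[i][-1] iterates the very set it is adding to), while B returns the sum of the distinct path sums (e.g. [[1],[2]] -> 3). — e.g. on uniqueWeightPaths([[1], [2]]): A raises RuntimeError, B returns 3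
import Mathlib
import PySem

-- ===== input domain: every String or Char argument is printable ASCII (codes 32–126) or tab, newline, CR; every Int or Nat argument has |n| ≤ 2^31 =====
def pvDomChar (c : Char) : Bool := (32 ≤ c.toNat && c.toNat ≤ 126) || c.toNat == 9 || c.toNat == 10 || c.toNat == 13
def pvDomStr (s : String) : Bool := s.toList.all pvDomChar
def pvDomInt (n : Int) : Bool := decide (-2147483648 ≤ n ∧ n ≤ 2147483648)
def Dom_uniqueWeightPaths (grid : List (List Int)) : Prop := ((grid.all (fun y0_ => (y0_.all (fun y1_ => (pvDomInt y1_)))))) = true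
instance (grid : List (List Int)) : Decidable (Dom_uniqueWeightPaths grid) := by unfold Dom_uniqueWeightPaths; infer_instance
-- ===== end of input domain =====

-- B replaces A's bottom-up n*m table of path-sum sets by a memoized recursive helper
-- reach(i,j) = set of path sums reaching cell (i,j) (objective: alternative decomposition).

-- ===== PORT A =====
-- grid[i][j]; indices are in range on every input admitted by Pre_
def pvGAt (grid : List (List Int)) (i j : Int) : Int :=
  PySem.List.pyGetD (PySem.List.pyGetD grid i []) j 0

-- s[i][j] (Python negative-index wraparound preserved; in range for the table's i,j)
def pvCell (s : List (List (PySem.Set Int))) (i j : Int) : PySem.Set Int :=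
  PySem.List.pyGetD (PySem.List.pyGetD s i []) j []

-- functional form of the in-place update s[i][j] = v
def pvSetCell (s : List (List (PySem.Set Int))) (i j : Int) (v : PySem.Set Int) :
    List (List (PySem.Set Int)) :=
  PySem.List.pySetD s i (PySem.List.pySetD (PySem.List.pyGetD s i []) j v)

-- body of A's inner loop at cell (i, j); the two 'for val in …: s[i][j].add(…)' loops are
-- folds accumulating the cell, written back once (exact under Pre_, which rules out the
-- single-column aliasing case where CPython raises RuntimeError mid-iteration)
def pvStepA (grid : List (List Int)) (i : Int) (s : List (List (PySem.Set Int))) (j : Int) :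
    List (List (PySem.Set Int)) :=
  if i = 0 ∧ j = 0 then
    pvSetCell s i j (PySem.Set.add (pvCell s i j) (pvGAt grid i j))
  else
    let c1 := (pvCell s (i - 1) j).foldl (fun c v => PySem.Set.add c (v + pvGAt grid i j)) (pvCell s i j)
    let c2 := (pvCell s i (j - 1)).foldl (fun c v => PySem.Set.add c (v + pvGAt grid i j)) c1
    pvSetCell s i j c2

def uniqueWeightPaths (grid : List (List Int)) : Int :=
  let n : Int := PySem.List.len grid
  let m : Int := PySem.List.len (PySem.List.pyGetD grid 0 [])
  if n = 0 ∨ m = 0 then 0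
  else
    let s0 : List (List (PySem.Set Int)) :=
      List.replicate n.toNat (List.replicate m.toNat ([] : PySem.Set Int))
    let s1 := pvSetCell s0 0 0 (PySem.Set.add (pvCell s0 0 0) (pvGAt grid 0 0))
    let s2 := (PySem.List.pyRange 0 n).foldl
        (fun s i => (PySem.List.pyRange 0 m).foldl (pvStepA grid i) s) s1
    (pvCell s2 (-1) (-1)).foldl (fun a v => a + v) 0

-- ===== PORT B =====
-- reach(i, j) of Source B: the set of path sums to cell (i, j); the memo dict of Source B only
-- caches these values, so the port is the plain recursion computing the same sets
-- structural recursion on a fuel argument (kernel-computable); the fuel n + m passed below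
-- always exceeds i + j, so the fuel-exhausted branch is never taken
def pvReach (grid : List (List Int)) : Nat → Nat → Nat → PySem.Set Int
  | 0, _, _ => PySem.Set.empty
  | fuel + 1, i, j =>
    if i = 0 ∧ j = 0 then PySem.Set.add PySem.Set.empty (pvGAt grid 0 0)
    else
      let g := pvGAt grid i j
      let st : PySem.Set Int := PySem.Set.empty
      let st := if 0 < i then
          (pvReach grid fuel (i - 1) j).foldl (fun c v => PySem.Set.add c (v + g)) st
        else st
      if 0 < j then
        (pvReach grid fuel i (j - 1)).foldl (fun c v => PySem.Set.add c (v + g)) st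
      else st

def uniqueWeightPaths_alt (grid : List (List Int)) : Int :=
  let n : Nat := grid.length
  let m : Nat := (PySem.List.pyGetD grid 0 []).length
  if m = 0 then 0
  else (pvReach grid (n + m) (n - 1) (m - 1)).foldl (fun a v => a + v) 0

-- ===== PRECONDITION & SPEC =====
-- Pre_ excludes exactly the inputs where the Python A raises: the empty grid and a grid whose
-- first row is longer than a later row (IndexError), and single-column grids with a nonzero
-- entry below the first row (RuntimeError: the loop over s[i][-1] mutates the set it iterates).
def Pre_uniqueWeightPaths (grid : List (List Int)) : Prop :=
  grid ≠ [] ∧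
  (∀ row ∈ grid, (grid.headD []).length ≤ row.length) ∧
  ((grid.headD []).length = 1 → ∀ row ∈ grid.tail, row.headD 0 = 0)
instance (grid : List (List Int)) : Decidable (Pre_uniqueWeightPaths grid) := by
  unfold Pre_uniqueWeightPaths; infer_instance

def pvWitness_uniqueWeightPaths : List (List Int) := [[1, 2], [3, 4]]

-- On single-column grids with ≥ 2 rows whose lower entries are not all zero, A raises
-- RuntimeError (set changed size during iteration) while B returns the sum of distinct path sums.
def Raises_uniqueWeightPaths (grid : List (List Int)) : Prop :=
  grid ≠ [] ∧
  (∀ row ∈ grid, (grid.headD []).length ≤ row.length) ∧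
  (grid.headD []).length = 1 ∧
  (∃ row ∈ grid.tail, row.headD 0 ≠ 0)
instance (grid : List (List Int)) : Decidable (Raises_uniqueWeightPaths grid) := by
  unfold Raises_uniqueWeightPaths; infer_instance

def pvRaiseWitness_uniqueWeightPaths : List (List Int) := [[1], [2]]
def pvRaiseWitnessOut_uniqueWeightPaths : Int := 3

def Spec_uniqueWeightPaths (grid : List (List Int)) (out : Int) : Prop := out = uniqueWeightPaths_alt grid
instance (grid : List (List Int)) (out : Int) : Decidable (Spec_uniqueWeightPaths grid out) := by
  unfold Spec_uniqueWeightPaths; infer_instance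

-- ===== CLAIM (what is proved, stated in full; the proofs are below) =====
def Claim_equal_uniqueWeightPaths : Prop := ∀ (grid : List (List Int)), Dom_uniqueWeightPaths grid → Pre_uniqueWeightPaths grid → Spec_uniqueWeightPaths grid (uniqueWeightPaths grid)
def Claim_raises_uniqueWeightPaths : Prop := (∀ (grid : List (List Int)), Dom_uniqueWeightPaths grid → Raises_uniqueWeightPaths grid → ¬ Pre_uniqueWeightPaths grid) ∧ (Dom_uniqueWeightPaths (pvRaiseWitness_uniqueWeightPaths) ∧ Raises_uniqueWeightPaths (pvRaiseWitness_uniqueWeightPaths) ∧ uniqueWeightPaths_alt (pvRaiseWitness_uniqueWeightPaths) = pvRaiseWitnessOut_uniqueWeightPaths)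

-- ===== LEMMAS AND PROOFS =====

-- cell (i, j) already scheduled when the sweep is about to process cell (hi, hj)
abbrev pvProc (hi hj i j : Nat) : Prop := i < hi ∨ (i = hi ∧ j < hj)

-- invariant of A's sweep: the table has shape n × m, processed cells (and the pre-seeded
-- (0,0)) hold pvReach, everything else is still the empty set
def pvInv (grid : List (List Int)) (hi hj : Nat) (s : List (List (PySem.Set Int))) : Prop :=
  s.length = grid.length ∧
  (∀ i, i < grid.length → (s.getD i []).length = (PySem.List.pyGetD grid 0 []).length) ∧
  (∀ i j, i < grid.length → j < (PySem.List.pyGetD grid 0 []).length →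
    (s.getD i []).getD j [] =
      if pvProc hi hj i j ∨ (i = 0 ∧ j = 0) then pvReach grid (i + j + 1) i j else [])

theorem pvCell_natCast (s : List (List (PySem.Set Int))) (i j : Nat) :
    pvCell s (i : Int) (j : Int) = (s.getD i []).getD j [] := by
  simp [pvCell, List.getD_eq_getElem?_getD]


theorem pvCell_negRow (s : List (List (PySem.Set Int))) (j : Nat) (h : 0 < s.length) :
    pvCell s (-1) (j : Int) = (s.getD (s.length - 1) []).getD j [] := by
  unfold pvCell
  rw [PySem.List.pyGetD_neg_ofNat s 1 [] (by omega) (by omega)]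
  simp [List.getD_eq_getElem?_getD, List.getElem?_eq_getElem (by omega : s.length - 1 < s.length)]


theorem pvCell_negCol (s : List (List (PySem.Set Int))) (i : Nat)
    (h : 0 < (s.getD i []).length) :
    pvCell s (i : Int) (-1) = (s.getD i []).getD ((s.getD i []).length - 1) [] := by
  unfold pvCell
  rw [show PySem.List.pyGetD s (i : Int) [] = s.getD i [] by simp [List.getD_eq_getElem?_getD]]
  rw [PySem.List.pyGetD_neg_ofNat _ 1 [] (by omega) (by omega)]
  exact (List.getD_eq_getElem _ _ (by omega)).symm


theorem pvCell_neg_neg (s : List (List (PySem.Set Int))) (h : 0 < s.length)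
    (h2 : 0 < (s.getD (s.length - 1) []).length) :
    pvCell s (-1) (-1) =
      (s.getD (s.length - 1) []).getD ((s.getD (s.length - 1) []).length - 1) [] := by
  unfold pvCell
  rw [PySem.List.pyGetD_neg_ofNat s 1 [] (by omega) (by omega)]
  rw [show s[s.length - 1] = s.getD (s.length - 1) []
    from (List.getD_eq_getElem _ _ (by omega)).symm]
  rw [PySem.List.pyGetD_neg_ofNat _ 1 [] (by omega) (by omega)]
  exact (List.getD_eq_getElem _ _ (by omega)).symm


theorem pvLength_pvSetCell (s : List (List (PySem.Set Int))) (i j : Int) (v : PySem.Set Int) :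
    (pvSetCell s i j v).length = s.length := by
  simp [pvSetCell, PySem.List.length_pySetD]


theorem pvGetD_pvSetCell (s : List (List (PySem.Set Int))) (i j a : Nat) (v : PySem.Set Int)
    (hi : i < s.length) :
    (pvSetCell s (i : Int) (j : Int) v).getD a [] =
      if a = i then (s.getD i []).set j v else s.getD a [] := by
  simp only [pvSetCell, PySem.List.pySetD_natCast, PySem.List.pyGetD_natCast,
    List.getD_eq_getElem?_getD, List.getElem?_set]
  rcases eq_or_ne a i with rfl | hne
  · simp [hi]
  · simp [hne, Ne.symm hne]


theorem pvReach_fuel (grid : List (List Int)) :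
    ∀ f1 f2 i j, i + j < f1 → i + j < f2 → pvReach grid f1 i j = pvReach grid f2 i j := by
  intro f1
  induction f1 with
  | zero => intro f2 i j h; omega
  | succ f ih =>
    intro f2 i j h1 h2
    cases f2 with
    | zero => omega
    | succ f2' =>
      simp only [pvReach]
      by_cases h0 : i = 0 ∧ j = 0
      · simp [h0]
      · simp only [h0, if_false]
        by_cases hi : 0 < i
        · by_cases hj : 0 < j
          · rw [ih f2' (i - 1) j (by omega) (by omega), ih f2' i (j - 1) (by omega) (by omega)]
          · simp only [hi, if_true, hj, if_false]
            rw [ih f2' (i - 1) j (by omega) (by omega)]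
        · by_cases hj : 0 < j
          · simp only [hi, if_false, hj, if_true]
            rw [ih f2' i (j - 1) (by omega) (by omega)]
          · omega


theorem pvGetD_set_self {α : Type} (l : List α) (i : Nat) (v d : α) (h : i < l.length) :
    (l.set i v).getD i d = v := by
  simp [List.getD_eq_getElem?_getD, h]


theorem pvGetD_set_ne {α : Type} (l : List α) (i j : Nat) (v d : α) (hne : j ≠ i) :
    (l.set i v).getD j d = l.getD j d := by
  simp [List.getD_eq_getElem?_getD, List.getElem?_set_ne, Ne.symm hne]


theorem pvSet_add_add (x : Int) :
    PySem.Set.add (PySem.Set.add PySem.Set.empty x) x = PySem.Set.add PySem.Set.empty x := by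
  simp [PySem.Set.add, PySem.Set.empty]

-- the value A's inner-loop body writes into cell (hi, hj) is exactly pvReach there

theorem pvStep_cell (grid : List (List Int)) (hi hj : Nat) (s : List (List (PySem.Set Int)))
    (hhi : hi < grid.length) (hhj : hj < (PySem.List.pyGetD grid 0 []).length)
    (hz : ¬ (hi = 0 ∧ hj = 0))
    (h1 : s.length = grid.length)
    (h2 : ∀ i, i < grid.length → (s.getD i []).length = (PySem.List.pyGetD grid 0 []).length)
    (h3 : ∀ i j, i < grid.length → j < (PySem.List.pyGetD grid 0 []).length →
      (s.getD i []).getD j [] =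
        if pvProc hi hj i j ∨ (i = 0 ∧ j = 0) then pvReach grid (i + j + 1) i j else []) :
    ((pvCell s ((hi : Int)) ((hj : Int) - 1)).foldl
        (fun c v => PySem.Set.add c (v + pvGAt grid (hi : Int) (hj : Int)))
        ((pvCell s ((hi : Int) - 1) (hj : Int)).foldl
          (fun c v => PySem.Set.add c (v + pvGAt grid (hi : Int) (hj : Int)))
          (pvCell s (hi : Int) (hj : Int)))) = pvReach grid (hi + hj + 1) hi hj := by
  have hcur : pvCell s (hi : Int) (hj : Int) = [] := by
    rw [pvCell_natCast, h3 hi hj hhi hhj, if_neg]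
    simp only [pvProc, not_or]
    exact ⟨by omega, hz⟩
  have hup : pvCell s ((hi : Int) - 1) (hj : Int) =
      if 0 < hi then pvReach grid (hi + hj) (hi - 1) hj else [] := by
    by_cases hip : 0 < hi
    · have hcond : pvProc hi hj (hi - 1) hj ∨ (hi - 1 = 0 ∧ hj = 0) := by
        unfold pvProc; omega
      rw [show (hi : Int) - 1 = ((hi - 1 : Nat) : Int) by omega, pvCell_natCast,
        h3 (hi - 1) hj (by omega) hhj, if_pos hcond]
      rw [if_pos hip]
      exact (pvReach_fuel grid (hi - 1 + hj + 1) (hi + hj) (hi - 1) hj (by omega) (by omega))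
    · have hi0 : hi = 0 := by omega
      subst hi0
      rw [show ((0 : Nat) : Int) - 1 = -1 by norm_num, pvCell_negRow s hj (by omega), h1,
        h3 (grid.length - 1) hj (by omega) hhj]
      have hcond : ¬ (pvProc 0 hj (grid.length - 1) hj ∨ (grid.length - 1 = 0 ∧ hj = 0)) := by
        unfold pvProc; omega
      rw [if_neg hcond, if_neg hip]
  have hleft : pvCell s ((hi : Int)) ((hj : Int) - 1) =
      if 0 < hj then pvReach grid (hi + hj) hi (hj - 1) else [] := by
    by_cases hjp : 0 < hj
    · have hcond : pvProc hi hj hi (hj - 1) ∨ (hi = 0 ∧ hj - 1 = 0) := by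
        unfold pvProc; omega
      rw [show (hj : Int) - 1 = ((hj - 1 : Nat) : Int) by omega, pvCell_natCast,
        h3 hi (hj - 1) hhi (by omega), if_pos hcond]
      rw [if_pos hjp]
      exact (pvReach_fuel grid (hi + (hj - 1) + 1) (hi + hj) hi (hj - 1) (by omega) (by omega))
    · have hj0 : hj = 0 := by omega
      subst hj0
      rw [show ((0 : Nat) : Int) - 1 = -1 by norm_num, pvCell_negCol s hi (by rw [h2 hi hhi]; omega),
        h2 hi hhi, h3 hi ((PySem.List.pyGetD grid 0 []).length - 1) hhi (by omega)]
      have hcond : ¬ (pvProc hi 0 hi ((PySem.List.pyGetD grid 0 []).length - 1) ∨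
          (hi = 0 ∧ (PySem.List.pyGetD grid 0 []).length - 1 = 0)) := by
        unfold pvProc; omega
      rw [if_neg hcond, if_neg hjp]
  rw [hcur, hup, hleft]
  conv_rhs => rw [pvReach]
  rw [if_neg hz]
  simp only []
  by_cases hip : 0 < hi <;> by_cases hjp : 0 < hj <;>
    simp only [hip, hjp, if_true, if_false, List.foldl_nil] <;> rfl


theorem pvStep_inv (grid : List (List Int)) (hi hj : Nat) (s : List (List (PySem.Set Int)))
    (hhi : hi < grid.length) (hhj : hj < (PySem.List.pyGetD grid 0 []).length)
    (h : pvInv grid hi hj s) :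
    pvInv grid hi (hj + 1) (pvStepA grid (hi : Int) s (hj : Int)) := by
  obtain ⟨h1, h2, h3⟩ := h
  by_cases hz : hi = 0 ∧ hj = 0
  · obtain ⟨rfl, rfl⟩ := hz
    unfold pvStepA
    rw [if_pos ⟨by norm_num, by norm_num⟩]
    have hc : pvCell s ((0 : Nat) : Int) ((0 : Nat) : Int) = pvReach grid 1 0 0 := by
      have hcond : pvProc 0 0 0 0 ∨ ((0:Nat) = 0 ∧ (0:Nat) = 0) := Or.inr ⟨rfl, rfl⟩
      rw [pvCell_natCast, h3 0 0 hhi hhj, if_pos hcond]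
    refine ⟨by rw [pvLength_pvSetCell]; exact h1, ?_, ?_⟩
    · intro i hilt
      rw [pvGetD_pvSetCell s 0 0 i _ (by omega)]
      split
      · next heq => subst heq; rw [List.length_set]; exact h2 _ hilt
      · exact h2 _ hilt
    · intro i j hij hjm
      rw [pvGetD_pvSetCell s 0 0 i _ (by omega)]
      by_cases hieq : i = 0
      · subst hieq
        rw [if_pos rfl]
        by_cases hjeq : j = 0
        · subst hjeq
          have hcond : pvProc 0 1 0 0 ∨ ((0:Nat) = 0 ∧ (0:Nat) = 0) := Or.inr ⟨rfl, rfl⟩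
          rw [pvGetD_set_self _ _ _ _ (by rw [h2 0 hhi]; omega), if_pos hcond]
          rw [hc]
          have : pvReach grid 1 0 0 = PySem.Set.add PySem.Set.empty (pvGAt grid 0 0) := by
            rw [pvReach]; rw [if_pos ⟨rfl, rfl⟩]
          rw [this]
          simp only [Nat.cast_zero]
          exact pvSet_add_add _
        · rw [pvGetD_set_ne _ _ _ _ _ hjeq]
          rw [h3 0 j hij hjm]
          congr 1
          rw [eq_iff_iff]
          unfold pvProc
          omega
      · rw [if_neg hieq, h3 i j hij hjm]
        congr 1
        rw [eq_iff_iff]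
        unfold pvProc
        omega
  · unfold pvStepA
    rw [if_neg (by
      intro hcontra
      exact hz ⟨by exact_mod_cast hcontra.1, by exact_mod_cast hcontra.2⟩)]
    simp only []
    rw [pvStep_cell grid hi hj s hhi hhj hz h1 h2 h3]
    refine ⟨by rw [pvLength_pvSetCell]; exact h1, ?_, ?_⟩
    · intro i hilt
      rw [pvGetD_pvSetCell s hi hj i _ (by omega)]
      split
      · next heq => subst heq; rw [List.length_set]; exact h2 _ hilt
      · exact h2 _ hilt
    · intro i j hij hjm
      rw [pvGetD_pvSetCell s hi hj i _ (by omega)]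
      by_cases hieq : i = hi
      · subst hieq
        rw [if_pos rfl]
        by_cases hjeq : j = hj
        · subst hjeq
          have hcond : pvProc i (j + 1) i j ∨ (i = 0 ∧ j = 0) := by
            unfold pvProc; omega
          rw [pvGetD_set_self _ _ _ _ (by rw [h2 i hij]; omega), if_pos hcond]
        · rw [pvGetD_set_ne _ _ _ _ _ hjeq]
          rw [h3 i j hij hjm]
          congr 1
          rw [eq_iff_iff]
          unfold pvProc
          omega
      · rw [if_neg hieq, h3 i j hij hjm]
        congr 1
        rw [eq_iff_iff]
        unfold pvProc
        omega


theorem pvInner (grid : List (List Int)) (hi : Nat) (hhi : hi < grid.length) :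
    ∀ (k hj : Nat) (s : List (List (PySem.Set Int))),
      hj + k = (PySem.List.pyGetD grid 0 []).length → pvInv grid hi hj s →
      pvInv grid hi (PySem.List.pyGetD grid 0 []).length
        ((PySem.List.pyRange (hj : Int) ((PySem.List.pyGetD grid 0 []).length : Int)).foldl
          (pvStepA grid (hi : Int)) s) := by
  intro k
  induction k with
  | zero =>
    intro hj s hk hinv
    obtain rfl : hj = (PySem.List.pyGetD grid 0 []).length := by omega
    rw [PySem.List.pyRange_one_eq_nil (by omega)]
    exact hinv
  | succ k ih =>
    intro hj s hk hinv
    rw [@PySem.List.pyRange_one_cons (hj : Int) ((PySem.List.pyGetD grid 0 []).length : Int) (by omega)]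
    rw [List.foldl_cons]
    have := ih (hj + 1) (pvStepA grid (hi : Int) s (hj : Int)) (by omega)
      (pvStep_inv grid hi hj s hhi (by omega) hinv)
    rw [show ((hj : Int) + 1) = ((hj + 1 : Nat) : Int) by push_cast; ring] at *
    exact this


theorem pvRelabel (grid : List (List Int)) (hi : Nat) (s : List (List (PySem.Set Int)))
    (h : pvInv grid hi (PySem.List.pyGetD grid 0 []).length s) : pvInv grid (hi + 1) 0 s := by
  obtain ⟨h1, h2, h3⟩ := h
  refine ⟨h1, h2, fun i j hij hjm => ?_⟩
  rw [h3 i j hij hjm]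
  congr 1
  simp only [pvProc, eq_iff_iff]
  constructor
  · rintro (⟨h | ⟨rfl, h⟩⟩ | h)
    · exact Or.inl (Or.inl (by omega))
    · exact Or.inl (Or.inl (by omega))
    · exact Or.inr h
  · rintro (⟨h | ⟨rfl, h⟩⟩ | h)
    · rcases Nat.lt_or_ge i hi with h' | h'
      · exact Or.inl (Or.inl h')
      · exact Or.inl (Or.inr ⟨by omega, hjm⟩)
    · omega
    · exact Or.inr h


theorem pvOuter (grid : List (List Int)) :
    ∀ (k hi : Nat) (s : List (List (PySem.Set Int))),
      hi + k = grid.length → pvInv grid hi 0 s →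
      pvInv grid grid.length 0
        ((PySem.List.pyRange (hi : Int) (grid.length : Int)).foldl
          (fun s i => (PySem.List.pyRange 0 ((PySem.List.pyGetD grid 0 []).length : Int)).foldl
            (pvStepA grid i) s) s) := by
  intro k
  induction k with
  | zero =>
    intro hi s hk hinv
    obtain rfl : hi = grid.length := by omega
    rw [@PySem.List.pyRange_one_eq_nil (grid.length : Int) (grid.length : Int) le_rfl]
    exact hinv
  | succ k ih =>
    intro hi s hk hinv
    rw [@PySem.List.pyRange_one_cons (hi : Int) (grid.length : Int) (by omega)]
    rw [List.foldl_cons]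
    have hstep := pvInner grid hi (by omega) (PySem.List.pyGetD grid 0 []).length 0 s (by omega) hinv
    rw [show ((0:Nat) : Int) = (0 : Int) by simp] at hstep
    have := ih (hi + 1)
      ((PySem.List.pyRange 0 ((PySem.List.pyGetD grid 0 []).length : Int)).foldl (pvStepA grid (hi:Int)) s)
      (by omega) (pvRelabel grid hi _ hstep)
    rw [show ((hi : Int) + 1) = ((hi + 1 : Nat) : Int) by push_cast; ring] at *
    exact this


theorem pvReplicate_getD (n m : Nat) (a : Nat) (ha : a < n) :
    ((List.replicate n (List.replicate m ([] : PySem.Set Int))).getD a []) =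
      List.replicate m ([] : PySem.Set Int) := by
  rw [List.getD_eq_getElem?_getD, List.getElem?_replicate, if_pos ha]
  rfl


theorem pvInit (grid : List (List Int)) (hN : 0 < grid.length)
    (hM : 0 < (PySem.List.pyGetD grid 0 []).length) :
    pvInv grid 0 0
      (pvSetCell
        (List.replicate grid.length
          (List.replicate (PySem.List.pyGetD grid 0 []).length ([] : PySem.Set Int))) 0 0
        (PySem.Set.add
          (pvCell (List.replicate grid.length
            (List.replicate (PySem.List.pyGetD grid 0 []).length ([] : PySem.Set Int))) 0 0)
          (pvGAt grid 0 0))) := by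
  set M := (PySem.List.pyGetD grid 0 []).length with hMdef
  set s0 : List (List (PySem.Set Int)) :=
    List.replicate grid.length (List.replicate M ([] : PySem.Set Int)) with hs0
  have hlen0 : s0.length = grid.length := by rw [hs0, List.length_replicate]
  have hcast : (0 : Int) = ((0 : Nat) : Int) := by simp
  rw [hcast]
  have hcell0 : pvCell s0 ((0 : Nat) : Int) ((0 : Nat) : Int) = [] := by
    rw [pvCell_natCast, pvReplicate_getD _ _ _ hN, List.getD_eq_getElem?_getD,
      List.getElem?_replicate, if_pos hM]
    rfl
  rw [hcell0]
  refine ⟨by rw [pvLength_pvSetCell]; exact hlen0, ?_, ?_⟩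
  · intro i hilt
    rw [pvGetD_pvSetCell _ _ _ _ _ (by omega)]
    split
    · next heq =>
      subst heq
      rw [List.length_set, pvReplicate_getD _ _ _ hN, List.length_replicate]
    · rw [pvReplicate_getD _ _ _ hilt, List.length_replicate]
  · intro i j hij hjm
    rw [pvGetD_pvSetCell _ _ _ _ _ (by omega)]
    by_cases hieq : i = 0
    · subst hieq
      rw [if_pos rfl, pvReplicate_getD _ _ _ hN]
      by_cases hjeq : j = 0
      · subst hjeq
        rw [pvGetD_set_self _ _ _ _ (by rw [List.length_replicate]; omega)]
        have hcond : pvProc 0 0 0 0 ∨ ((0 : Nat) = 0 ∧ (0 : Nat) = 0) := Or.inr ⟨rfl, rfl⟩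
        rw [if_pos hcond]
        rw [pvReach, if_pos ⟨rfl, rfl⟩]
        rfl
      · rw [pvGetD_set_ne _ _ _ _ _ hjeq, List.getD_eq_getElem?_getD,
          List.getElem?_replicate, if_pos hjm]
        have hcond : ¬ (pvProc 0 0 0 j ∨ ((0 : Nat) = 0 ∧ j = 0)) := by
          unfold pvProc; omega
        rw [if_neg hcond]
        rfl
    · rw [if_neg hieq, pvReplicate_getD _ _ _ hij, List.getD_eq_getElem?_getD,
        List.getElem?_replicate, if_pos hjm]
      have hcond : ¬ (pvProc 0 0 i j ∨ (i = 0 ∧ j = 0)) := by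
        unfold pvProc; omega
      rw [if_neg hcond]
      rfl


theorem pvAB (grid : List (List Int)) : uniqueWeightPaths grid = uniqueWeightPaths_alt grid := by
  unfold uniqueWeightPaths uniqueWeightPaths_alt
  simp only [PySem.List.len_eq, Int.toNat_natCast]
  by_cases hM : (PySem.List.pyGetD grid 0 []).length = 0
  · rw [if_pos (Or.inr (by exact_mod_cast hM)), if_pos hM]
  · have hN : 0 < grid.length := by
      by_contra hc
      have hnil : grid = [] := by
        cases grid with
        | nil => rfl
        | cons a l => simp at hc
      rw [hnil] at hM
      exact hM rfl
    rw [if_neg (by omega), if_neg hM]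
    -- run the invariant through the whole sweep
    have hinit := pvInit grid hN (by omega)
    have houter := pvOuter grid grid.length 0 _ (by omega) hinit
    rw [show ((0 : Nat) : Int) = (0 : Int) by simp] at houter
    obtain ⟨h1, h2, h3⟩ := houter
    set M := (PySem.List.pyGetD grid 0 []).length with hMdef
    set s2 := (PySem.List.pyRange 0 (grid.length : Int)).foldl
        (fun s i => (PySem.List.pyRange 0 (M : Int)).foldl (pvStepA grid i) s)
        (pvSetCell (List.replicate grid.length (List.replicate M ([] : PySem.Set Int))) 0 0
          (PySem.Set.add
            (pvCell (List.replicate grid.length (List.replicate M ([] : PySem.Set Int))) 0 0)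
            (pvGAt grid 0 0))) with hs2
    have hrl : (s2.getD (s2.length - 1) []).length = M := by
      rw [h1]; exact h2 (grid.length - 1) (by omega)
    have hfin : pvCell s2 (-1) (-1) = (s2.getD (grid.length - 1) []).getD (M - 1) [] := by
      rw [pvCell_neg_neg s2 (by omega) (by omega), hrl, h1]
    rw [hfin, h3 (grid.length - 1) (M - 1) (by omega) (by omega)]
    have hcond : pvProc grid.length 0 (grid.length - 1) (M - 1) ∨
        (grid.length - 1 = 0 ∧ M - 1 = 0) := by
      unfold pvProc; omega
    rw [if_pos hcond]
    rw [pvReach_fuel grid (grid.length - 1 + (M - 1) + 1) (grid.length + M)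
      (grid.length - 1) (M - 1) (by omega) (by omega)]

-- ===== VERDICT (by name: the statement is the Claim_ definition above) =====
theorem uniqueWeightPaths_spec : Claim_equal_uniqueWeightPaths := by
  intro grid _ _
  unfold Spec_uniqueWeightPaths
  exact pvAB grid

theorem uniqueWeightPaths_raises : Claim_raises_uniqueWeightPaths := by
  unfold Claim_raises_uniqueWeightPaths
  constructor
  · intro grid _ hr hp
    exact (hr.2.2.2.elim fun row hrow => hrow.2 (hp.2.2 hr.2.2.1 row hrow.1))
  · decide

-- self-check: the crash-fix witness really lies inside the stated raise region
theorem uniqueWeightPaths_raise_witness_ok :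
    Raises_uniqueWeightPaths pvRaiseWitness_uniqueWeightPaths :=
  uniqueWeightPaths_raises.2.2.1
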